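-- pv_equiv track=rewrite | github.com/rafarpl/sp-trans-pipeline | src/monitoring/health_checks.py | _summarize_health
-- ===== SOURCE A (Python) =====
-- from typing import Dict, Any, Optional, List
-- from enum import Enum
--
-- class HealthStatus(str, Enum):
--     """Status de saúde"""
--     HEALTHY = "healthy"
--     DEGRADED = "degraded"
--     UNHEALTHY = "unhealthy"
--     UNKNOWN = "unknown"
--
-- def _summarize_health(
--
--     components: Dict[str, Dict[str, Any]]
-- ) -> Dict[str, int]:
--     """Sumariza contadores de status"""
--
--     summary = {
--         "total": len(components),
--         "healthy": 0,
--         "degraded": 0,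
--         "unhealthy": 0,
--         "unknown": 0,
--     }
--
--     for comp in components.values():
--         status = comp.get("status", HealthStatus.UNKNOWN.value)
--         if status == HealthStatus.HEALTHY.value:
--             summary["healthy"] += 1
--         elif status == HealthStatus.DEGRADED.value:
--             summary["degraded"] += 1
--         elif status == HealthStatus.UNHEALTHY.value:
--             summary["unhealthy"] += 1
--         else:
--             summary["unknown"] += 1
--
--     return summary
-- ===== SOURCE B (Python) =====
-- from typing import Dict, Any
-- from enum import Enum
--
-- class HealthStatus(str, Enum):
--     HEALTHY = "healthy"
--     DEGRADED = "degraded"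
--     UNHEALTHY = "unhealthy"
--     UNKNOWN = "unknown"
--
-- def _summarize_health(
--     components: Dict[str, Dict[str, Any]]
-- ) -> Dict[str, int]:
--     """Sumariza contadores de status (staged passes, no branching)."""
--     statuses = [comp.get("status", HealthStatus.UNKNOWN.value)
--                 for comp in components.values()]
--     healthy = statuses.count(HealthStatus.HEALTHY.value)
--     degraded = statuses.count(HealthStatus.DEGRADED.value)
--     unhealthy = statuses.count(HealthStatus.UNHEALTHY.value)
--     return {
--         "total": len(statuses),
--         "healthy": healthy,
--         "degraded": degraded,
--         "unhealthy": unhealthy,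
--         "unknown": len(statuses) - healthy - degraded - unhealthy,
--     }
-- ===== Notes on version B (the rewrite author's own statement) =====
-- stated objective: alternative
-- what changed: Replaces A's single Python-level loop with if/elif dispatch mutating a pre-seeded five-key summary dict by staged passes: one comprehension extracts the status list, then each named bucket is a separate C-level statuses.count() scan and 'unknown' is derived arithmetically as the remainder, with no branching and no mutable dict.
import Mathlib
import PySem

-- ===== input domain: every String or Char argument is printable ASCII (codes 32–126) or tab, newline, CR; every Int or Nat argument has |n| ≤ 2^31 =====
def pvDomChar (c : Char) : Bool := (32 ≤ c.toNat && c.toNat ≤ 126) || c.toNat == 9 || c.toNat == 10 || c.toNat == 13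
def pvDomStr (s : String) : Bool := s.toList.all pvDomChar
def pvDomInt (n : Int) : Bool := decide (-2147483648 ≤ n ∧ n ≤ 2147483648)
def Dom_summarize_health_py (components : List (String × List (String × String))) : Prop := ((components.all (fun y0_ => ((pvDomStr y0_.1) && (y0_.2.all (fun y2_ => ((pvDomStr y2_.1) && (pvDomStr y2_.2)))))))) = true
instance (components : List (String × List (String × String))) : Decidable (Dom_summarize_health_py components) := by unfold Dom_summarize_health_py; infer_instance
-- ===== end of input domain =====

-- B replaces A's single branching loop over a mutable five-key dict by staged passes:
-- extract the status list once, count each named bucket by a separate scan, and derive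
-- 'unknown' arithmetically as the remainder (alternative decomposition, same cost).

-- ===== PORT A =====
def summarize_health_py (components : List (String × List (String × String))) : List (String × Int) :=
  let summary : PySem.Dict String Int :=
    PySem.Dict.mk [("total", (components.length : Int)), ("healthy", 0), ("degraded", 0),
                   ("unhealthy", 0), ("unknown", 0)]
  let final := components.foldl (fun summary comp =>
    let status := (PySem.Dict.mk comp.2).getD "status" "unknown"
    if status == "healthy" then summary.modify "healthy" 0 (· + 1)
    else if status == "degraded" then summary.modify "degraded" 0 (· + 1)
    else if status == "unhealthy" then summary.modify "unhealthy" 0 (· + 1)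
    else summary.modify "unknown" 0 (· + 1)) summary
  final.items

-- ===== PORT B =====
def summarize_health_py_alt (components : List (String × List (String × String))) : List (String × Int) :=
  let statuses := components.map (fun comp => (PySem.Dict.mk comp.2).getD "status" "unknown")
  let healthy := PySem.List.count statuses "healthy"
  let degraded := PySem.List.count statuses "degraded"
  let unhealthy := PySem.List.count statuses "unhealthy"
  [("total", (statuses.length : Int)), ("healthy", healthy), ("degraded", degraded),
   ("unhealthy", unhealthy),
   ("unknown", (statuses.length : Int) - healthy - degraded - unhealthy)]

-- ===== PRECONDITION & SPEC =====
def Spec_summarize_health_py (components : List (String × List (String × String))) (out : List (String × Int)) : Prop := out = summarize_health_py_alt components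
instance (components : List (String × List (String × String))) (out : List (String × Int)) : Decidable (Spec_summarize_health_py components out) := by unfold Spec_summarize_health_py; infer_instance

-- ===== CLAIM (what is proved, stated in full; the proofs are below) =====
def Claim_equal_summarize_health_py : Prop := ∀ (components : List (String × List (String × String))), Dom_summarize_health_py components → Spec_summarize_health_py components (summarize_health_py components)

-- ===== LEMMAS AND PROOFS =====

/-- The status string a component contributes (comp.get("status", "unknown")). -/
def pvStatusOf (comp : String × List (String × String)) : String :=
  (PySem.Dict.mk comp.2).getD "status" "unknown"

/-- A status outside the three named buckets (A's else branch). -/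
def pvOther (s : String) : Bool :=
  !(s == "healthy" || s == "degraded" || s == "unhealthy")

/-- Name for A's loop body (identical to the lambda in the port). -/
def pvStepA (summary : PySem.Dict String Int) (comp : String × List (String × String)) :
    PySem.Dict String Int :=
  let status := (PySem.Dict.mk comp.2).getD "status" "unknown"
  if status == "healthy" then summary.modify "healthy" 0 (· + 1)
  else if status == "degraded" then summary.modify "degraded" 0 (· + 1)
  else if status == "unhealthy" then summary.modify "unhealthy" 0 (· + 1)
  else summary.modify "unknown" 0 (· + 1)

/-- Name for the five-key summary dict. -/
def pvMk5 (t h d u k : Int) : PySem.Dict String Int :=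
  PySem.Dict.mk [("total", t), ("healthy", h), ("degraded", d), ("unhealthy", u), ("unknown", k)]

lemma pvStepA_healthy (t h d u k : Int) (comp : String × List (String × String))
    (hc : pvStatusOf comp = "healthy") : pvStepA (pvMk5 t h d u k) comp = pvMk5 t (h + 1) d u k := by
  simp only [pvStatusOf] at hc
  simp only [pvStepA, beq_iff_eq, hc]
  simp [pvMk5, PySem.Dict.modify, PySem.Dict.insert, PySem.Dict.getD, PySem.Dict.get?]

lemma pvStepA_degraded (t h d u k : Int) (comp : String × List (String × String))
    (hc : pvStatusOf comp = "degraded") : pvStepA (pvMk5 t h d u k) comp = pvMk5 t h (d + 1) u k := by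
  simp only [pvStatusOf] at hc
  simp only [pvStepA, beq_iff_eq, hc]
  simp [pvMk5, PySem.Dict.modify, PySem.Dict.insert, PySem.Dict.getD, PySem.Dict.get?]

lemma pvStepA_unhealthy (t h d u k : Int) (comp : String × List (String × String))
    (hc : pvStatusOf comp = "unhealthy") : pvStepA (pvMk5 t h d u k) comp = pvMk5 t h d (u + 1) k := by
  simp only [pvStatusOf] at hc
  simp only [pvStepA, beq_iff_eq, hc]
  simp [pvMk5, PySem.Dict.modify, PySem.Dict.insert, PySem.Dict.getD, PySem.Dict.get?]

lemma pvStepA_other (t h d u k : Int) (comp : String × List (String × String))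
    (h1 : pvStatusOf comp ≠ "healthy") (h2 : pvStatusOf comp ≠ "degraded")
    (h3 : pvStatusOf comp ≠ "unhealthy") : pvStepA (pvMk5 t h d u k) comp = pvMk5 t h d u (k + 1) := by
  simp only [pvStatusOf] at h1 h2 h3
  simp only [pvStepA, beq_iff_eq, h1, h2, h3, if_false]
  simp [pvMk5, PySem.Dict.modify, PySem.Dict.insert, PySem.Dict.getD, PySem.Dict.get?]

/-- A's loop, from any summary of the fixed five-key shape, adds the per-bucket counts
of the statuses; the else branch counts exactly the statuses satisfying `pvOther`. -/
lemma summaryA_foldl (l : List (String × List (String × String))) (t h d u k : Int) :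
    (l.foldl pvStepA (pvMk5 t h d u k)).items
    = [("total", t),
       ("healthy", h + ((l.map pvStatusOf).count "healthy" : Int)),
       ("degraded", d + ((l.map pvStatusOf).count "degraded" : Int)),
       ("unhealthy", u + ((l.map pvStatusOf).count "unhealthy" : Int)),
       ("unknown", k + ((l.map pvStatusOf).countP pvOther : Int))] := by
  induction l generalizing h d u k with
  | nil => simp [pvMk5]
  | cons x xs ih =>
    rw [List.foldl_cons]
    by_cases h1 : pvStatusOf x = "healthy"
    · rw [pvStepA_healthy t h d u k x h1, ih]
      simp [h1, pvOther]
      ring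
    · by_cases h2 : pvStatusOf x = "degraded"
      · rw [pvStepA_degraded t h d u k x h2, ih]
        simp [h2, pvOther]
        ring
      · by_cases h3 : pvStatusOf x = "unhealthy"
        · rw [pvStepA_unhealthy t h d u k x h3, ih]
          simp [h3, pvOther]
          ring
        · rw [pvStepA_other t h d u k x h1 h2 h3, ih]
          simp [h1, h2, h3, pvOther]
          ring

/-- Every status falls in exactly one bucket: the three named counts plus the rest make the length. -/
lemma count_partition (m : List String) :
    m.length = m.count "healthy" + m.count "degraded" + m.count "unhealthy" + m.countP pvOther := by
  induction m with
  | nil => simp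
  | cons x xs ih =>
    simp only [List.length_cons, List.count_cons, List.countP_cons]
    by_cases h1 : x = "healthy" <;> by_cases h2 : x = "degraded" <;>
      by_cases h3 : x = "unhealthy" <;> simp [h1, h2, h3, pvOther] <;> omega

lemma portA_eq_foldl (components : List (String × List (String × String))) :
    summarize_health_py components
    = (components.foldl pvStepA (pvMk5 (components.length : Int) 0 0 0 0)).items := rfl

-- ===== VERDICT (by name: the statement is the Claim_ definition above) =====
theorem summarize_health_py_spec : Claim_equal_summarize_health_py := by
  intro components _
  unfold Spec_summarize_health_py summarize_health_py_alt
  rw [show (fun (comp : String × List (String × String)) => (PySem.Dict.mk comp.2).getD "status" "unknown") = pvStatusOf from rfl]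
  rw [portA_eq_foldl, summaryA_foldl]
  simp only [PySem.List.count_eq, zero_add, List.length_map]
  have hp := count_partition (components.map pvStatusOf)
  simp only [List.length_map] at hp
  simp only [List.cons.injEq, Prod.mk.injEq, and_true, true_and]
  omega
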